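-- pv_equiv track=rewrite | github.com/owtotwo/password-forgotten-no-more | pwd_4goten_no_more.py | alphanum_to_alphanumpunct
-- ===== SOURCE A (Python) =====
-- def alphanum_to_alphanumpunct(s):
--     assert s.isalnum()
--     ascii_list = []
--
--     DIGIT_NUM = ord('9') - ord('0') + 1
--     UPPERCASE_NUM = ord('Z') - ord('A') + 1
--     LOWERCASE_NUM = ord('z') - ord('a') + 1
--     MD5_BASE = DIGIT_NUM + UPPERCASE_NUM + LOWERCASE_NUM
--
--     for c in s:
--         if c.isdigit():
--             ascii_list.append(ord(c) - ord('0'))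
--         elif c.isupper():
--             ascii_list.append(ord(c) - ord('A') + DIGIT_NUM)
--         elif c.islower():
--             ascii_list.append(ord(c) - ord('a') + DIGIT_NUM + UPPERCASE_NUM)
--         else:
--             raise Exception()
--
--     ascii_list.reverse()
--
--     sum = 0
--
--     for i, n in enumerate(ascii_list):
--         sum = sum + n * (MD5_BASE ** i)
--
--     BEGIN_ASCII_NUM = ord('!') # space not allowed
--     PASSWD_BASE = ord('~') - BEGIN_ASCII_NUM + 1
--
--     new_ascii_list = [] # with punctution
--
--     while sum > 0:
--         new_ascii_list.append(sum % PASSWD_BASE)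
--         sum = sum // PASSWD_BASE
--
--     new_ascii_list.reverse()
--     return ''.join([ chr(n + BEGIN_ASCII_NUM) for n in new_ascii_list ])
-- ===== SOURCE B (Python) =====
-- def alphanum_to_alphanumpunct(s):
--     # Horner accumulation in base 62, then emit base-94 digits most-significant-first by prepending.
--     n = 0
--     for c in s:
--         o = ord(c)
--         if '0' <= c <= '9':
--             d = o - 48
--         elif 'A' <= c <= 'Z':
--             d = o - 65 + 10
--         elif 'a' <= c <= 'z':
--             d = o - 97 + 36
--         else:
--             raise Exception()
--         n = n * 62 + d
--     res = ''
--     while n > 0: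
--         n, r = divmod(n, 94)
--         res = chr(r + 33) + res
--     return res
-- ===== Notes on version B (the rewrite author's own statement) =====
-- stated objective: faster
-- what changed: B accumulates the base-62 value with Horner's rule in one forward pass (no list reversal, no 62**i power computations) and emits the base-94 string most-significant-first by prepending, instead of A's reverse/enumerate/power sum and append-then-reverse digit list.
import Mathlib
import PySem

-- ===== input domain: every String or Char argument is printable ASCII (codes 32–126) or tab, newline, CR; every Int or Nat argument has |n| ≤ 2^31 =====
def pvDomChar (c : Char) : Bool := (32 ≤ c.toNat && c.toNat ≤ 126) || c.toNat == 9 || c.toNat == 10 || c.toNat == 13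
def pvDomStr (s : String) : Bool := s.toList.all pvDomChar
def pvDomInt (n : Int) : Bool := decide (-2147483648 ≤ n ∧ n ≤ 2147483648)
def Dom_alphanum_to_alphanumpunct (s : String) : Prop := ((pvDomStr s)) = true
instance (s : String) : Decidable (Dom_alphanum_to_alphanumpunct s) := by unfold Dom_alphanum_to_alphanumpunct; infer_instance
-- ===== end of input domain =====

-- B: Horner's rule for the base-62 accumulation and most-significant-first emission of the
-- base-94 digits (objective: faster — avoids recomputing 62**i powers).


-- ===== PORT A =====
-- The `while sum > 0:` loop of A: append sum % 94, sum //= 94.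
def pvAWhile (sum : Int) (acc : List Int) : List Int :=
  if h : 0 < sum then
    pvAWhile (PySem.Int.floordiv sum 94) (acc ++ [PySem.Int.mod sum 94])
  else acc
  termination_by sum.toNat
  decreasing_by
    have := PySem.Int.floordiv_lt_iff_lt_mul (a := sum) (b := 94) (q := sum) (by omega)
    have h94 : 0 ≤ PySem.Int.floordiv sum 94 := by
      have := PySem.Int.le_floordiv_iff_mul_le (a := sum) (b := 94) (q := 0) (by omega)
      omega
    omega

-- Port of A. The initial `assert s.isalnum()` raises exactly on the inputs Pre_ excludes
-- (on the printable-ASCII domain, isalnum ⇔ nonempty ∧ every char in 0-9A-Za-z), as does the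
-- `raise Exception()` branch; inside Pre_ neither fires.  Per-char isdigit/isupper/islower
-- are ported as the corresponding ASCII range tests (exact on Dom for alnum chars).
def alphanum_to_alphanumpunct (s : String) : String :=
  let ascii_list : List Int := s.toList.foldl (fun acc c =>
    if 48 ≤ c.toNat ∧ c.toNat ≤ 57 then acc ++ [((c.toNat : Int) - 48)]
    else if 65 ≤ c.toNat ∧ c.toNat ≤ 90 then acc ++ [((c.toNat : Int) - 65 + 10)]
    else if 97 ≤ c.toNat ∧ c.toNat ≤ 122 then acc ++ [((c.toNat : Int) - 97 + 10 + 26)]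
    else acc) []   -- `raise` branch: unreachable inside Pre_
  let rev := ascii_list.reverse
  let sum : Int := (PySem.List.enumerate rev).foldl (fun acc p => acc + p.2 * (62 ^ p.1.toNat)) 0
  let new_ascii_list := pvAWhile sum []
  String.mk ((new_ascii_list.reverse).map (fun n => Char.ofNat (n + 33).toNat))

-- ===== PORT B =====
def pvDigitVal (c : Char) : Int :=
  if 48 ≤ c.toNat ∧ c.toNat ≤ 57 then (c.toNat : Int) - 48
  else if 65 ≤ c.toNat ∧ c.toNat ≤ 90 then (c.toNat : Int) - 65 + 10
  else if 97 ≤ c.toNat ∧ c.toNat ≤ 122 then (c.toNat : Int) - 97 + 36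
  else 0   -- `raise` branch: unreachable inside Pre_

-- B's `while n > 0:` loop: divmod(n, 94), prepend chr(r + 33).
def pvBWhile (n : Int) (res : List Char) : List Char :=
  if h : 0 < n then
    pvBWhile (PySem.Int.floordiv n 94) (Char.ofNat (PySem.Int.mod n 94 + 33).toNat :: res)
  else res
  termination_by n.toNat
  decreasing_by
    have := PySem.Int.floordiv_lt_iff_lt_mul (a := n) (b := 94) (q := n) (by omega)
    have h94 : 0 ≤ PySem.Int.floordiv n 94 := by
      have := PySem.Int.le_floordiv_iff_mul_le (a := n) (b := 94) (q := 0) (by omega)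
      omega
    omega

def alphanum_to_alphanumpunct_alt (s : String) : String :=
  let n : Int := s.toList.foldl (fun n c => n * 62 + pvDigitVal c) 0
  String.mk (pvBWhile n [])

-- ===== PRECONDITION & SPEC =====
-- Pre_ excludes exactly the inputs where A raises: the empty string and strings with a
-- non-alphanumeric character (the assert, resp. the explicit raise).
def Pre_alphanum_to_alphanumpunct (s : String) : Prop :=
  s.toList ≠ [] ∧ (s.toList.all fun c =>
    (48 ≤ c.toNat && c.toNat ≤ 57) || (65 ≤ c.toNat && c.toNat ≤ 90) || (97 ≤ c.toNat && c.toNat ≤ 122)) = true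
instance (s : String) : Decidable (Pre_alphanum_to_alphanumpunct s) := by
  unfold Pre_alphanum_to_alphanumpunct; infer_instance
def pvWitness_alphanum_to_alphanumpunct : String := "aB3"

def Spec_alphanum_to_alphanumpunct (s : String) (out : String) : Prop := out = alphanum_to_alphanumpunct_alt s
instance (s : String) (out : String) : Decidable (Spec_alphanum_to_alphanumpunct s out) := by unfold Spec_alphanum_to_alphanumpunct; infer_instance

-- ===== CLAIM (what is proved, stated in full; the proofs are below) =====
def Claim_equal_alphanum_to_alphanumpunct : Prop := ∀ (s : String), Dom_alphanum_to_alphanumpunct s → Pre_alphanum_to_alphanumpunct s → Spec_alphanum_to_alphanumpunct s (alphanum_to_alphanumpunct s)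


-- ===== LEMMAS AND PROOFS =====

-- divisor-94 step shrinks a positive Int (used throughout for the while-loop inductions)
theorem pv_step_lt (n : Int) (h : 0 < n) :
    (PySem.Int.floordiv n 94).toNat < n.toNat ∧ 0 ≤ PySem.Int.floordiv n 94 := by
  have h1 := PySem.Int.floordiv_lt_iff_lt_mul (a := n) (b := 94) (q := n) (by omega)
  have h2 := PySem.Int.le_floordiv_iff_mul_le (a := n) (b := 94) (q := 0) (by omega)
  omega

-- little-endian base-62 value of a digit list
def pvValLE (l : List Int) : Int := l.foldr (fun v r => v + 62 * r) 0

theorem pvValLE_append (m : List Int) (x : Int) :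
    pvValLE (m ++ [x]) = pvValLE m + x * 62 ^ m.length := by
  induction m with
  | nil => simp [pvValLE]
  | cons y ys ih => simp [pvValLE, List.foldr] at ih ⊢; rw [ih]; ring

-- A's enumerate-power sum computes the little-endian value
theorem pv_enum_sum (m : List Int) : ∀ (k : Nat) (a : Int),
    (PySem.List.enumerate m (k : Int)).foldl (fun acc p => acc + p.2 * (62 ^ p.1.toNat)) a
      = a + pvValLE m * 62 ^ k := by
  induction m with
  | nil => intro k a; simp [PySem.List.enumerate_nil, pvValLE]
  | cons x xs ih =>
    intro k a
    rw [PySem.List.enumerate_cons]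
    have hk : ((k : Int) + 1) = ((k + 1 : Nat) : Int) := by push_cast; ring
    simp only [List.foldl_cons, hk, ih]
    simp only [Int.toNat_natCast, pvValLE, List.foldr]
    ring

-- B's Horner fold computes the big-endian value (little-endian value of the reverse)
theorem pv_horner (l : List Int) : ∀ (a : Int),
    l.foldl (fun n v => n * 62 + v) a = a * 62 ^ l.length + pvValLE l.reverse := by
  induction l with
  | nil => intro a; simp [pvValLE]
  | cons x xs ih =>
    intro a
    simp only [List.foldl_cons, ih, List.reverse_cons, pvValLE_append,
      List.length_reverse, List.length_cons]
    ring

-- Under Pre_, A's digit-list fold is `map pvDigitVal`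
theorem pv_list_build (l : List Char)
    (hl : ∀ c ∈ l, (48 ≤ c.toNat ∧ c.toNat ≤ 57) ∨ (65 ≤ c.toNat ∧ c.toNat ≤ 90) ∨ (97 ≤ c.toNat ∧ c.toNat ≤ 122)) :
    ∀ (acc : List Int),
    l.foldl (fun acc c =>
      if 48 ≤ c.toNat ∧ c.toNat ≤ 57 then acc ++ [((c.toNat : Int) - 48)]
      else if 65 ≤ c.toNat ∧ c.toNat ≤ 90 then acc ++ [((c.toNat : Int) - 65 + 10)]
      else if 97 ≤ c.toNat ∧ c.toNat ≤ 122 then acc ++ [((c.toNat : Int) - 97 + 10 + 26)]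
      else acc) acc = acc ++ l.map pvDigitVal := by
  induction l with
  | nil => intro acc; simp
  | cons c cs ih =>
    intro acc
    have hc := hl c (List.mem_cons_self ..)
    have hcs : ∀ x ∈ cs, (48 ≤ x.toNat ∧ x.toNat ≤ 57) ∨ (65 ≤ x.toNat ∧ x.toNat ≤ 90) ∨ (97 ≤ x.toNat ∧ x.toNat ≤ 122) :=
      fun x hx => hl x (List.mem_cons_of_mem _ hx)
    simp only [List.foldl_cons, List.map_cons, pvDigitVal]
    rcases hc with h | h | h
    · rw [if_pos h, ih hcs]; simp [h]
    · have h9 : ¬(48 ≤ c.toNat ∧ c.toNat ≤ 57) := by omega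
      rw [if_neg h9, if_pos h, ih hcs]
      simp [h9, h]
    · have h9 : ¬(48 ≤ c.toNat ∧ c.toNat ≤ 57) := by omega
      have hZ : ¬(65 ≤ c.toNat ∧ c.toNat ≤ 90) := by omega
      rw [if_neg h9, if_neg hZ, if_pos h, ih hcs]
      simp [h9, hZ, h]
      ring

-- A's while loop appends to its accumulator
theorem pvAWhile_acc : ∀ (k : Nat) (n : Int), n.toNat ≤ k → ∀ (acc : List Int),
    pvAWhile n acc = acc ++ pvAWhile n [] := by
  intro k
  induction k with
  | zero =>
    intro n hn acc
    conv_lhs => rw [pvAWhile]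
    conv_rhs => rw [pvAWhile]
    simp [show ¬ 0 < n by omega]
  | succ k ih =>
    intro n hn acc
    conv_lhs => rw [pvAWhile]
    conv_rhs => rw [pvAWhile]
    by_cases h : 0 < n
    · obtain ⟨hlt, _⟩ := pv_step_lt n h
      simp only [h, dite_true]
      rw [ih _ (by omega) (acc ++ _), ih _ (by omega) ([] ++ _)]
      simp
    · simp [h]

theorem pvAWhile_pos (n : Int) (h : 0 < n) :
    pvAWhile n [] = PySem.Int.mod n 94 :: pvAWhile (PySem.Int.floordiv n 94) [] := by
  conv_lhs => rw [pvAWhile]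
  obtain ⟨hlt, _⟩ := pv_step_lt n h
  simp only [h, dite_true]
  rw [pvAWhile_acc (PySem.Int.floordiv n 94).toNat _ le_rfl]
  simp

-- B's while loop is A's loop reversed and mapped through chr(· + 33)
theorem pv_while_agree : ∀ (k : Nat) (n : Int), n.toNat ≤ k → ∀ (res : List Char),
    pvBWhile n res
      = (pvAWhile n []).reverse.map (fun m => Char.ofNat (m + 33).toNat) ++ res := by
  intro k
  induction k with
  | zero =>
    intro n hn res
    rw [pvBWhile, pvAWhile]
    have : ¬ 0 < n := by omega
    simp [this]
  | succ k ih =>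
    intro n hn res
    by_cases h : 0 < n
    · obtain ⟨hlt, _⟩ := pv_step_lt n h
      rw [pvBWhile]
      simp only [h, dite_true]
      rw [ih _ (by omega), pvAWhile_pos n h]
      simp
    · rw [pvBWhile, pvAWhile]
      simp [h]

-- ===== VERDICT (by name: the statement is the Claim_ definition above) =====
theorem alphanum_to_alphanumpunct_spec : Claim_equal_alphanum_to_alphanumpunct := by
  intro s _ hpre
  obtain ⟨-, hballs⟩ := hpre
  have hall : ∀ c ∈ s.toList,
      (48 ≤ c.toNat ∧ c.toNat ≤ 57) ∨ (65 ≤ c.toNat ∧ c.toNat ≤ 90) ∨ (97 ≤ c.toNat ∧ c.toNat ≤ 122) := by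
    simpa [List.all_eq_true, Bool.or_eq_true, Bool.and_eq_true, decide_eq_true_eq, or_assoc] using hballs
  unfold Spec_alphanum_to_alphanumpunct alphanum_to_alphanumpunct alphanum_to_alphanumpunct_alt
  simp only
  rw [pv_list_build s.toList hall [], List.nil_append]
  have he := pv_enum_sum ((s.toList.map pvDigitVal).reverse) 0 0
  simp only [Int.natCast_zero, pow_zero, mul_one, zero_add] at he
  rw [he]
  have hh := pv_horner (s.toList.map pvDigitVal) 0
  rw [List.foldl_map] at hh
  simp only [zero_mul, zero_add] at hh
  rw [hh, pv_while_agree ((pvValLE (s.toList.map pvDigitVal).reverse).toNat) _ le_rfl]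
  simp
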